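-- pv_equiv track=rewrite | github.com/carussastories2-cloud/robo-python | utils/validators.py | validate_candle_pattern
-- ===== SOURCE A (Python) =====
-- from typing import Any, Dict, List, Optional, Union
--
-- def validate_candle_pattern(pattern: List[str]) -> bool:
--     """
--     Valida padrão de cores de velas
--
--     Args:
--         pattern: Lista com cores das velas
--
--     Returns:
--         bool: True se válido, False caso contrário
--     """
--     if not isinstance(pattern, list) or len(pattern) == 0:
--         return False
--
--     valid_colors = ['RED', 'GREEN', 'ANY']
--
--     # Todas as cores devem ser válidas
--     if not all(color in valid_colors for color in pattern):
--         return False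
--
--     # Deve ter pelo menos uma cor específica (não só ANY)
--     if all(color == 'ANY' for color in pattern):
--         return False
--
--     # Máximo 10 velas
--     if len(pattern) > 10:
--         return False
--
--     return True
-- ===== SOURCE B (Python) =====
-- def validate_candle_pattern(pattern):
--     if not isinstance(pattern, list):
--         return False
--     n = 0
--     concrete = False
--     for color in pattern:
--         if color == 'RED' or color == 'GREEN':
--             concrete = True
--         elif color != 'ANY':
--             return False
--         n += 1
--         if n > 10:
--             return False
--     return concrete
-- ===== Notes on version B (the rewrite author's own statement) =====
-- stated objective: alternative
-- what changed: Replaces A's three staged whole-list scans (all-valid, all-ANY, length cap) with one streaming pass that keeps a running count and a saw-concrete-color flag, returning False early on an invalid color or an 11th element and returning the flag at the end.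
import Mathlib
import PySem

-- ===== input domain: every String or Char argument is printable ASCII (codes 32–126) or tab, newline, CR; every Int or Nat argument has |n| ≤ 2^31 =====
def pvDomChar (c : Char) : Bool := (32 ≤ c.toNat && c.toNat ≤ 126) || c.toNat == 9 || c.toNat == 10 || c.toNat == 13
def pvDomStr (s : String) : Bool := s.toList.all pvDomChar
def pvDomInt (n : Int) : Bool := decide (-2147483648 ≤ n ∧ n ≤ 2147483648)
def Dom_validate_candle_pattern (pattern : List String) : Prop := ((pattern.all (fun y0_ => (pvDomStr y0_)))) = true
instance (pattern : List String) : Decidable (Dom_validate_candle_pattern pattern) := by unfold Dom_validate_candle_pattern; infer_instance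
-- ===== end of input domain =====

-- B replaces A's three staged whole-list scans with one streaming pass keeping a count and a saw-concrete flag (alternative decomposition; same cost).

-- ===== PORT A =====
def validate_candle_pattern (pattern : List String) : Bool :=
  if pattern.length = 0 then false
  else
    let valid_colors : List String := ["RED", "GREEN", "ANY"]
    if !(pattern.all (fun color => valid_colors.contains color)) then false
    else if pattern.all (fun color => color == "ANY") then false
    else if pattern.length > 10 then false
    else true

-- ===== PORT B =====
-- body of Source B's for-loop, step for step: flag update, elif early return, count, cap check
def vcpLoop (l : List String) (n : Nat) (concrete : Bool) : Bool :=
  match l with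
  | [] => concrete
  | color :: rest =>
    let concrete := if color == "RED" || color == "GREEN" then true else concrete
    if !(color == "RED" || color == "GREEN") && color != "ANY" then false
    else if n + 1 > 10 then false
    else vcpLoop rest (n + 1) concrete

def validate_candle_pattern_alt (pattern : List String) : Bool :=
  vcpLoop pattern 0 false

-- ===== PRECONDITION & SPEC =====
def Spec_validate_candle_pattern (pattern : List String) (out : Bool) : Prop := out = validate_candle_pattern_alt pattern
instance (pattern : List String) (out : Bool) : Decidable (Spec_validate_candle_pattern pattern out) := by unfold Spec_validate_candle_pattern; infer_instance

-- ===== CLAIM (what is proved, stated in full; the proofs are below) =====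
def Claim_equal_validate_candle_pattern : Prop := ∀ (pattern : List String), Dom_validate_candle_pattern pattern → Spec_validate_candle_pattern pattern (validate_candle_pattern pattern)

-- ===== LEMMAS AND PROOFS =====

theorem vcpLoop_char (l : List String) : ∀ (n : Nat) (concrete : Bool), n ≤ 10 →
    vcpLoop l n concrete =
      (l.all (fun c => (["RED", "GREEN", "ANY"] : List String).contains c)
        && decide (n + l.length ≤ 10)
        && (concrete || l.any (fun c => c == "RED" || c == "GREEN"))) := by
  induction l with
  | nil => intro n concrete hn; simp [vcpLoop, hn]
  | cons c rest ih =>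
    intro n concrete hn
    have harith : n + 1 + rest.length = n + (rest.length + 1) := by omega
    by_cases hR : c = "RED"
    · by_cases hcap : n + 1 > 10
      · simp [vcpLoop, hR, hcap]; omega
      · rw [show vcpLoop (c :: rest) n concrete = vcpLoop rest (n + 1) true by
          simp [vcpLoop, hR, hcap], ih (n+1) true (by omega)]
        simp [hR, harith]
    · by_cases hG : c = "GREEN"
      · by_cases hcap : n + 1 > 10
        · simp [vcpLoop, hG, hcap]; omega
        · rw [show vcpLoop (c :: rest) n concrete = vcpLoop rest (n + 1) true by
            simp [vcpLoop, hG, hcap], ih (n+1) true (by omega)]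
          simp [hG, harith]
      · by_cases hA : c = "ANY"
        · by_cases hcap : n + 1 > 10
          · simp [vcpLoop, hA, hcap]; omega
          · rw [show vcpLoop (c :: rest) n concrete = vcpLoop rest (n + 1) concrete by
              simp [vcpLoop, hA, hcap], ih (n+1) concrete (by omega)]
            simp [hA, hR, hG, harith]
        · simp [vcpLoop, hR, hG, hA]

-- ===== VERDICT (by name: the statement is the Claim_ definition above) =====
theorem validate_candle_pattern_spec : Claim_equal_validate_candle_pattern := by
  intro pattern _
  unfold Spec_validate_candle_pattern
  rw [validate_candle_pattern_alt, vcpLoop_char pattern 0 false (by omega)]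
  unfold validate_candle_pattern
  by_cases hnil : pattern.length = 0
  · have : pattern = [] := List.length_eq_zero_iff.mp hnil
    subst this; simp
  · rw [if_neg hnil]
    cases hA : pattern.all (fun color => (["RED", "GREEN", "ANY"] : List String).contains color)
    · simp only [hA]; simp
    · simp only [hA]
      simp only [Bool.not_true, Bool.false_eq_true, if_false, Bool.true_and]
      cases hB : pattern.all (fun color => color == "ANY")
      · have hany : pattern.any (fun c => (c == "RED" || c == "GREEN")) = true := by
          simp only [List.all_eq_true] at hA
          simp only [Bool.eq_false_iff, ne_eq, List.all_eq_true] at hB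
          push Not at hB
          obtain ⟨c, hc, hne⟩ := hB
          have := hA c hc
          simp [List.contains_eq_mem] at this
          refine List.any_eq_true.mpr ⟨c, hc, ?_⟩
          rcases this with h | h | h <;> simp_all
        simp only [hB, hany]
        simp only [Bool.false_eq_true, if_false]
        simp only [Bool.false_or, Bool.and_true, Bool.true_and, Nat.zero_add]
        split_ifs with h <;> simp <;> omega
      · have hno : pattern.any (fun c => (c == "RED" || c == "GREEN")) = false := by
          simp only [List.all_eq_true] at hB
          simp only [List.any_eq_false]
          intro c hc
          have := hB c hc
          simp_all
        simp only [hB, hno]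
        simp
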